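-- pv_equiv track=rewrite | github.com/jalani2727/CC---PyFunctions | addExclamation.py | add_exclamation
-- ===== SOURCE A (Python) =====
-- def add_exclamation(word):
--   if len(word) < 20:
--     i = len(word)
--     while i < 20:
--       word+= "!"
--       i+=1
--     return word
--   else:
--     return word
-- ===== SOURCE B (Python) =====
-- def add_exclamation(word):
--   return word + "!" * (20 - len(word))
-- ===== Notes on version B (the rewrite author's own statement) =====
-- stated objective: simpler
-- what changed: Replaced the conditional while-loop that appends the exclamation pad one character at a time with a single closed-form expression concatenating the repetition of the pad up to length 20; repetition of a non-positive count is empty, so no branch is needed.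
import Mathlib
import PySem

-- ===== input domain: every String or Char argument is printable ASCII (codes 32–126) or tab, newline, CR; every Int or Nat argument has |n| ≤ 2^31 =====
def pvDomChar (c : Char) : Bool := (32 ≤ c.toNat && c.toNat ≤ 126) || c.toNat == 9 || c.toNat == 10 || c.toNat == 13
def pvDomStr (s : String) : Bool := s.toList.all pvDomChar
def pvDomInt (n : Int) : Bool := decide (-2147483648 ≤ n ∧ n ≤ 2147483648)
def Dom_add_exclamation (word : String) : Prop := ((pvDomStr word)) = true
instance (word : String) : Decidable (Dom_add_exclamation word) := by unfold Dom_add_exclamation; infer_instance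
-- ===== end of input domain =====

-- B replaces A's conditional one-character-at-a-time padding while loop with a single
-- closed-form concatenation of the repeated pad; simpler, same return value on all strings.
-- ===== PORT A =====
-- the 'while i < 20' loop of A; terminates because i increases towards 20
def addExclLoop (word : List Char) (i : Nat) : List Char :=
  if i < 20 then addExclLoop (word ++ ['!']) (i + 1) else word
  termination_by 20 - i

def add_exclamation (word : String) : String :=
  if word.toList.length < 20 then
    String.ofList (addExclLoop word.toList word.toList.length)
  else word

-- ===== PORT B =====
def add_exclamation_alt (word : String) : String :=
  String.ofList (word.toList ++ List.replicate (20 - word.toList.length) '!')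

-- ===== PRECONDITION & SPEC =====
def Spec_add_exclamation (word : String) (out : String) : Prop := out = add_exclamation_alt word
instance (word : String) (out : String) : Decidable (Spec_add_exclamation word out) := by unfold Spec_add_exclamation; infer_instance

-- ===== CLAIM (what is proved, stated in full; the proofs are below) =====
def Claim_equal_add_exclamation : Prop := ∀ (word : String), Dom_add_exclamation word → Spec_add_exclamation word (add_exclamation word)

-- ===== LEMMAS AND PROOFS =====

-- ===== VERDICT (by name: the statement is the Claim_ definition above) =====
theorem addExclLoop_eq (word : List Char) (i : Nat) :
    addExclLoop word i = word ++ List.replicate (20 - i) '!' := by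
  fun_induction addExclLoop word i with
  | case1 w i h ih =>
      rw [ih]
      have h20 : 20 - i = (20 - (i + 1)) + 1 := by omega
      rw [h20, List.replicate_succ]
      simp
  | case2 w i h =>
      have h20 : 20 - i = 0 := by omega
      simp [h20]

theorem add_exclamation_spec : Claim_equal_add_exclamation := by
  intro word _
  unfold Spec_add_exclamation add_exclamation add_exclamation_alt
  split
  · rw [addExclLoop_eq]
  · next h =>
      have h20 : 20 - word.toList.length = 0 := by omega
      simp only [h20, List.replicate_zero, List.append_nil, String.ofList_toList]
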